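-- pv_equiv track=rewrite | github.com/achraf5201/a_maze_ing | src/display.py | create_solve_cor
-- ===== SOURCE A (Python) =====
-- from typing import Any
--
-- def create_solve_cor(
--         entry: tuple[Any, Any], str: str) -> list[tuple[Any, Any]]:
--     """Converts a string of directions into a list of coordinates
--     representing the solution path.
--
--     Args:
--         entry (Tuple[int, int]): Starting coordinates.
--         str (str): String of directions ('N', 'S', 'E', 'W').
--
--     Returns:
--         List[Tuple[int, int]]: List of coordinates
--         traversed following the directions.
--     """
--     x, y = entry
--     mylist = []
--     for i in str:
--         if i == 'S':
--             y += 1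
--             mylist.append((y, x))
--         if i == 'N':
--             y -= 1
--             mylist.append((y, x))
--         if i == 'W':
--             x -= 1
--             mylist.append((y, x))
--         if i == 'E':
--             x += 1
--             mylist.append((y, x))
--     return mylist
-- ===== SOURCE B (Python) =====
-- _DELTAS = {'S': (0, 1), 'N': (0, -1), 'W': (-1, 0), 'E': (1, 0)}
--
--
-- def _cumsum(start, deltas):
--     """Running sums of `deltas` starting from (but not including) `start`."""
--     out = []
--     for d in deltas:
--         start += d
--         out.append(start)
--     return out
--
--
-- def create_solve_cor(entry, str):
--     # Stage 1: translate the direction string into (dx, dy) deltas,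
--     # dropping unrecognized characters.
--     ds = [_DELTAS[c] for c in str if c in _DELTAS]
--     # Stage 2: integrate each axis independently (per-axis prefix sums),
--     # then zip the two coordinate streams swapped as (y, x).
--     xs = _cumsum(entry[0], [d[0] for d in ds])
--     ys = _cumsum(entry[1], [d[1] for d in ds])
--     return list(zip(ys, xs))
-- ===== Notes on version B (the rewrite author's own statement) =====
-- stated objective: alternative
-- what changed: Replaces A's single interleaved walk (shared (x,y) state mutated through a four-way if-chain with in-loop appends) by a staged pipeline: translate the string to (dx,dy) deltas via a table, integrate each axis independently as a per-axis prefix sum, and zip the two coordinate streams swapped as (y,x). (constant-factor speedup: comprehensions and tight per-axis loops instead of a four-way per-character if-chain)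
import Mathlib
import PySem

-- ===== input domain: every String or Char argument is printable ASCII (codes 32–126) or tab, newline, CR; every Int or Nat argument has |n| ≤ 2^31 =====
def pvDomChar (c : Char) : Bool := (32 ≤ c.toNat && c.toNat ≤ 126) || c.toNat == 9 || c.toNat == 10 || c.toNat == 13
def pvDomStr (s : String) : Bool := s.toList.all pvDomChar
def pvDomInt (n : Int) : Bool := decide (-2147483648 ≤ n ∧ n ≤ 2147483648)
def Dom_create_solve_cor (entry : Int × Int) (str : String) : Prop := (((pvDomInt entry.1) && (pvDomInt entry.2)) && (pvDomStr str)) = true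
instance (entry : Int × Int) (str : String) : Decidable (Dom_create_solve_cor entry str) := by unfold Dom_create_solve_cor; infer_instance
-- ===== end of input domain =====

-- B replaces A's interleaved mutating walk by a staged pipeline: table-lookup to (dx,dy)
-- deltas, per-axis prefix sums, then zipping the two coordinate streams swapped (alternative decomposition).


-- ===== PORT A =====
-- one loop iteration of A: four sequential ifs, each mutating (x, y) and appending (y, x)
def pvStepA (st : Int × Int × List (Int × Int)) (i : Char) : Int × Int × List (Int × Int) :=
  let (x, y, mylist) := st
  let (x, y, mylist) := if i = 'S' then (x, y + 1, mylist ++ [(y + 1, x)]) else (x, y, mylist)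
  let (x, y, mylist) := if i = 'N' then (x, y - 1, mylist ++ [(y - 1, x)]) else (x, y, mylist)
  let (x, y, mylist) := if i = 'W' then (x - 1, y, mylist ++ [(y, x - 1)]) else (x, y, mylist)
  let (x, y, mylist) := if i = 'E' then (x + 1, y, mylist ++ [(y, x + 1)]) else (x, y, mylist)
  (x, y, mylist)

def create_solve_cor (entry : Int × Int) (str : String) : List (Int × Int) :=
  (str.toList.foldl pvStepA (entry.1, entry.2, [])).2.2

-- ===== PORT B =====
-- _DELTAS.get
def pvDelta (c : Char) : Option (Int × Int) :=
  if c = 'S' then some (0, 1)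
  else if c = 'N' then some (0, -1)
  else if c = 'W' then some (-1, 0)
  else if c = 'E' then some (1, 0)
  else none

-- _cumsum: running sums of deltas starting from (but not including) start
def pvCumsum (start : Int) : List Int → List Int
  | [] => []
  | d :: rest => (start + d) :: pvCumsum (start + d) rest

def create_solve_cor_alt (entry : Int × Int) (str : String) : List (Int × Int) :=
  let ds := str.toList.filterMap pvDelta
  let xs := pvCumsum entry.1 (ds.map Prod.fst)
  let ys := pvCumsum entry.2 (ds.map Prod.snd)
  ys.zip xs

-- ===== PRECONDITION & SPEC =====
def Spec_create_solve_cor (entry : Int × Int) (str : String) (out : List (Int × Int)) : Prop := out = create_solve_cor_alt entry str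
instance (entry : Int × Int) (str : String) (out : List (Int × Int)) : Decidable (Spec_create_solve_cor entry str out) := by unfold Spec_create_solve_cor; infer_instance

-- ===== CLAIM (what is proved, stated in full; the proofs are below) =====
def Claim_equal_create_solve_cor : Prop := ∀ (entry : Int × Int) (str : String), Dom_create_solve_cor entry str → Spec_create_solve_cor entry str (create_solve_cor entry str)

-- ===== LEMMAS AND PROOFS =====

-- B's result on a delta list, as one function (the zip of the two per-axis prefix sums)
def pvZipB (x y : Int) (ds : List (Int × Int)) : List (Int × Int) :=
  (pvCumsum y (ds.map Prod.snd)).zip (pvCumsum x (ds.map Prod.fst))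

-- final position of the walk, used only to state the loop invariant
def pvPosB (x y : Int) : List Char → Int × Int
  | [] => (x, y)
  | c :: rest =>
    match pvDelta c with
    | none => pvPosB x y rest
    | some d => pvPosB (x + d.1) (y + d.2) rest

theorem pvFoldA_eq (cs : List Char) : ∀ (x y : Int) (acc : List (Int × Int)),
    cs.foldl pvStepA (x, y, acc) = ((pvPosB x y cs).1, (pvPosB x y cs).2, acc ++ pvZipB x y (cs.filterMap pvDelta)) := by
  induction cs with
  | nil => intro x y acc; simp [pvPosB, pvZipB, pvCumsum]
  | cons c rest ih =>
    intro x y acc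
    simp only [List.foldl_cons]
    by_cases hS : c = 'S' <;> by_cases hN : c = 'N' <;> by_cases hW : c = 'W' <;> by_cases hE : c = 'E' <;>
      simp_all [pvStepA, pvDelta, pvPosB, pvZipB, pvCumsum, sub_eq_add_neg]

-- ===== VERDICT (by name: the statement is the Claim_ definition above) =====
theorem create_solve_cor_spec : Claim_equal_create_solve_cor := by
  intro entry str _
  unfold Spec_create_solve_cor create_solve_cor create_solve_cor_alt
  rw [pvFoldA_eq]
  simp [pvZipB]
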